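-- pv_equiv track=rewrite | github.com/AZhenWang/vw | app/batches/run_threshold_model.py | get_holdings
-- ===== SOURCE A (Python) =====
-- def get_holdings(Y_hat):
--     holdings = [0] * 2
--     holding = 0
--     for i in range(2, len(Y_hat)):
--         if Y_hat[i] <= 8 <= Y_hat[i - 1]:
--             holding = 0
--         elif (Y_hat[i] > Y_hat[i - 1]) and (Y_hat[i - 1] > 8):
--             holding = 1
--
--         holdings.append(holding)
--
--     return holdings
-- ===== SOURCE B (Python) =====
-- def get_holdings(Y_hat):
--     n = len(Y_hat)
--     out = [0] * max(n, 2)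
--     # change points: indices where the holding state is forced (sell -> 0, buy -> 1)
--     events = [i for i in range(2, n)
--               if Y_hat[i] <= 8 <= Y_hat[i - 1]
--               or Y_hat[i] > Y_hat[i - 1] > 8]
--     # between consecutive change points the state is constant; paint the
--     # segment [e, next_event) with 1 exactly when the change point is a buy
--     for e, nxt in zip(events, events[1:] + [n]):
--         if Y_hat[e] > 8:  # a buy event (sell events have Y_hat[e] <= 8)
--             for k in range(e, nxt):
--                 out[k] = 1
--     return out
-- ===== Notes on version B (the rewrite author's own statement) =====
-- stated objective: alternative
-- what changed: Instead of scanning with a threaded holding state, B extracts the list of change-point indices (sell/buy events) in one pass and then paints the constant-1 segments between each buy event and the next event into a preallocated zero array; no per-step state machine remains.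
import Mathlib
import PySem

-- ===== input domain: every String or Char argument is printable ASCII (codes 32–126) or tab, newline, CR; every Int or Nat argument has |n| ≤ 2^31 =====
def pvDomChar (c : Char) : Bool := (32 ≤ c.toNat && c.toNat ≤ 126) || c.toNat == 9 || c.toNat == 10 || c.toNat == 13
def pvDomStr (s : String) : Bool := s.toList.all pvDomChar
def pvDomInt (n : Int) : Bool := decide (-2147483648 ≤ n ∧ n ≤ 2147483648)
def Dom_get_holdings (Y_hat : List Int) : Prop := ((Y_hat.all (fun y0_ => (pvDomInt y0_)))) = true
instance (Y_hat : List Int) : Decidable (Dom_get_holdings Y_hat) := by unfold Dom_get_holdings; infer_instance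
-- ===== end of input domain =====

-- B replaces A's stateful scan by change-point extraction plus segment painting (objective: alternative).

-- ===== PORT A =====
-- literal transliteration of A: fold over range(2, len(Y_hat)) carrying (holdings, holding)
def get_holdings (Y_hat : List Int) : List Int :=
  ((PySem.List.pyRange 2 (Y_hat.length : Int) 1).foldl
    (fun (st : List Int × Int) i =>
      let holding : Int :=
        if PySem.List.pyGetD Y_hat i 0 ≤ 8 ∧ 8 ≤ PySem.List.pyGetD Y_hat (i - 1) 0 then 0
        else if PySem.List.pyGetD Y_hat i 0 > PySem.List.pyGetD Y_hat (i - 1) 0 ∧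
                PySem.List.pyGetD Y_hat (i - 1) 0 > 8 then 1
        else st.2
      (st.1 ++ [holding], holding))
    ([0, 0], 0)).1

-- ===== PORT B =====
-- transliteration of Source B: collect the change-point indices, then paint [e, nxt) with 1 for buy events
def get_holdings_alt (Y_hat : List Int) : List Int :=
  let n : Int := (Y_hat.length : Int)
  let out : List Int := List.replicate (max Y_hat.length 2) 0
  let events : List Int := (PySem.List.pyRange 2 n 1).filter
    (fun i => decide ((PySem.List.pyGetD Y_hat i 0 ≤ 8 ∧ 8 ≤ PySem.List.pyGetD Y_hat (i - 1) 0) ∨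
      (PySem.List.pyGetD Y_hat i 0 > PySem.List.pyGetD Y_hat (i - 1) 0 ∧
       PySem.List.pyGetD Y_hat (i - 1) 0 > 8)))
  (events.zip (events.drop 1 ++ [n])).foldl
    (fun o p =>
      if 8 < PySem.List.pyGetD Y_hat p.1 0 then
        (PySem.List.pyRange p.1 p.2 1).foldl (fun o k => o.set k.toNat 1) o
      else o)
    out

-- ===== PRECONDITION & SPEC =====
def Spec_get_holdings (Y_hat : List Int) (out : List Int) : Prop := out = get_holdings_alt Y_hat
instance (Y_hat : List Int) (out : List Int) : Decidable (Spec_get_holdings Y_hat out) := by unfold Spec_get_holdings; infer_instance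

-- ===== CLAIM (what is proved, stated in full; the proofs are below) =====
def Claim_equal_get_holdings : Prop := ∀ (Y_hat : List Int), Dom_get_holdings Y_hat → Spec_get_holdings Y_hat (get_holdings Y_hat)

-- ===== LEMMAS AND PROOFS =====

def gd (Y : List Int) (i : ℕ) : Int := Y.getD i 0
def sellB (Y : List Int) (i : ℕ) : Bool := decide (gd Y i ≤ 8 ∧ 8 ≤ gd Y (i - 1))
def buyB (Y : List Int) (i : ℕ) : Bool := decide (gd Y (i - 1) < gd Y i ∧ 8 < gd Y (i - 1))
def evB (Y : List Int) (i : ℕ) : Bool := decide (2 ≤ i) && (sellB Y i || buyB Y i)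
def bT (Y : List Int) (e : ℕ) : Bool := decide (8 < gd Y e)
def sVal (Y : List Int) : ℕ → Int
  | 0 => 0
  | j + 1 =>
    if j + 1 < 2 then 0
    else if sellB Y (j + 1) then 0
    else if buyB Y (j + 1) then 1
    else sVal Y j
def Q (Y : List Int) (j : ℕ) : Prop :=
  ∃ e, evB Y e = true ∧ bT Y e = true ∧ e ≤ j ∧ ∀ i, evB Y i = true → e < i → j < i

theorem sVal_eq_one_iff (Y : List Int) : ∀ j, sVal Y j = 1 ↔ Q Y j := by
  intro j
  induction j with
  | zero =>
    simp only [sVal, Q]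
    constructor
    · intro h; exact absurd h (by norm_num)
    · rintro ⟨e, he, _, hle, _⟩
      simp only [evB, Bool.and_eq_true, decide_eq_true_eq] at he; omega
  | succ j ih =>
    simp only [sVal]
    by_cases h2 : j + 1 < 2
    · rw [if_pos h2]
      constructor
      · intro h; exact absurd h (by norm_num)
      · rintro ⟨e, he, _, hle, _⟩
        simp only [evB, Bool.and_eq_true, decide_eq_true_eq] at he; omega
    · rw [if_neg h2]
      by_cases hs : sellB Y (j + 1) = true
      · rw [if_pos hs]
        constructor
        · intro h; exact absurd h (by norm_num)
        · rintro ⟨e, he, hb, hle, hall⟩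
          exfalso
          have hev : evB Y (j + 1) = true := by
            simp only [evB, Bool.and_eq_true, Bool.or_eq_true, decide_eq_true_eq]
            exact ⟨by omega, Or.inl (by simpa [sellB] using hs)⟩
          rcases Nat.lt_or_ge e (j + 1) with hlt | hge
          · have := hall (j + 1) hev hlt; omega
          · have : e = j + 1 := by omega
            subst this
            simp only [sellB, decide_eq_true_eq] at hs
            simp only [bT, decide_eq_true_eq] at hb
            omega
      · rw [if_neg hs]
        by_cases hbuy : buyB Y (j + 1) = true
        · rw [if_pos hbuy]
          constructor
          · intro _
            refine ⟨j + 1, ?_, ?_, le_refl _, ?_⟩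
            · simp only [evB, Bool.and_eq_true, Bool.or_eq_true, decide_eq_true_eq]
              exact ⟨by omega, Or.inr (by simpa [buyB] using hbuy)⟩
            · simp only [buyB, decide_eq_true_eq] at hbuy
              simp only [bT, decide_eq_true_eq]
              omega
            · intro i _ hlt; omega
          · intro _; rfl
        · rw [if_neg hbuy]
          rw [ih]
          have hnev : evB Y (j + 1) = false := by
            simp only [evB, Bool.and_eq_false_iff, Bool.or_eq_false_iff]
            right
            exact ⟨by simpa using hs, by simpa using hbuy⟩
          constructor
          · rintro ⟨e, he, hb, hle, hall⟩
            refine ⟨e, he, hb, by omega, ?_⟩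
            intro i hi hlt
            have h1 := hall i hi hlt
            rcases Nat.eq_or_lt_of_le (by omega : j + 1 ≤ i) with h | h
            · exfalso; rw [h] at hnev; rw [hnev] at hi; exact Bool.false_ne_true hi
            · omega
          · rintro ⟨e, he, hb, hle, hall⟩
            have hne : e ≠ j + 1 := by
              intro h; subst h; rw [hnev] at he; exact Bool.false_ne_true he
            refine ⟨e, he, hb, by omega, ?_⟩
            intro i hi hlt
            have := hall i hi hlt; omega
def specList (Y : List Int) : List Int := (List.range (max Y.length 2)).map (sVal Y)

theorem sVal_two_add (Y : List Int) (k : ℕ) :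
    sVal Y (2 + k) = if gd Y (2 + k) ≤ 8 ∧ 8 ≤ gd Y (1 + k) then 0
      else if gd Y (1 + k) < gd Y (2 + k) ∧ 8 < gd Y (1 + k) then 1 else sVal Y (1 + k) := by
  rw [show 2 + k = (1 + k) + 1 by omega]
  simp only [sVal, sellB, buyB, show (1 + k + 1) - 1 = 1 + k from by omega, decide_eq_true_eq]
  rw [if_neg (by omega : ¬ 1 + k + 1 < 2)]

theorem a_inv (Y : List Int) : ∀ k : ℕ,
    ((PySem.List.pyRange 2 ((2 + k : ℕ) : Int) 1).foldl
      (fun (st : List Int × Int) i =>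
        let holding : Int :=
          if PySem.List.pyGetD Y i 0 ≤ 8 ∧ 8 ≤ PySem.List.pyGetD Y (i - 1) 0 then 0
          else if PySem.List.pyGetD Y i 0 > PySem.List.pyGetD Y (i - 1) 0 ∧
                  PySem.List.pyGetD Y (i - 1) 0 > 8 then 1
          else st.2
        (st.1 ++ [holding], holding))
      ([0, 0], 0))
    = ((List.range (2 + k)).map (sVal Y), sVal Y (1 + k)) := by
  intro k
  induction k with
  | zero =>
    rw [show ((2 + 0 : ℕ) : Int) = 2 by norm_num, PySem.List.pyRange_one_eq_nil (le_refl 2)]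
    simp [sVal, List.range_succ]
  | succ k ih =>
    have hsplit : ((2 + (k + 1) : ℕ) : Int) = ((2 + k : ℕ) : Int) + 1 := by push_cast; ring
    rw [hsplit, PySem.List.pyRange_one_succ_right (by exact_mod_cast Nat.le_add_right 2 k),
        List.foldl_append, ih]
    simp only [List.foldl_cons, List.foldl_nil]
    have hg1 : PySem.List.pyGetD Y ((2 + k : ℕ) : Int) 0 = gd Y (2 + k) := by
      rw [PySem.List.pyGetD_natCast]; rfl
    have hg2 : PySem.List.pyGetD Y (((2 + k : ℕ) : Int) - 1) 0 = gd Y (1 + k) := by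
      rw [show (((2 + k : ℕ) : Int) - 1) = ((1 + k : ℕ) : Int) by push_cast; ring,
          PySem.List.pyGetD_natCast]; rfl
    rw [hg1, hg2, ← sVal_two_add]
    rw [show 2 + (k + 1) = (2 + k) + 1 by omega, List.range_succ, List.map_append,
        show 1 + (k + 1) = 2 + k by omega, List.map_cons, List.map_nil]

theorem a_eq_spec (Y : List Int) : get_holdings Y = specList Y := by
  unfold get_holdings specList
  rcases Nat.lt_or_ge Y.length 2 with h | h
  · rw [PySem.List.pyRange_one_eq_nil (by exact_mod_cast Nat.le_of_lt h)]
    rw [show max Y.length 2 = 2 by omega]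
    simp [sVal, List.range_succ]
  · have hk : Y.length = 2 + (Y.length - 2) := by omega
    rw [show max Y.length 2 = Y.length by omega]
    rw [hk, a_inv Y (Y.length - 2)]
theorem sVal01 (Y : List Int) : ∀ j, sVal Y j = 0 ∨ sVal Y j = 1 := by
  intro j
  induction j with
  | zero => left; rfl
  | succ j ih =>
    simp only [sVal]
    split_ifs <;> simp [ih]

def paintSeg (o : List Int) (a m : ℕ) : List Int :=
  (List.range m).foldl (fun o k => o.set (a + k) 1) o

theorem paintSeg_length (o : List Int) (a : ℕ) : ∀ m, (paintSeg o a m).length = o.length := by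
  intro m
  induction m with
  | zero => rfl
  | succ m ih =>
    unfold paintSeg at *
    rw [List.range_succ, List.foldl_append, List.foldl_cons, List.foldl_nil,
        List.length_set, ih]

theorem paintSeg_getD (o : List Int) (a : ℕ) : ∀ m j,
    (paintSeg o a m).getD j 0 = if a ≤ j ∧ j < a + m ∧ j < o.length then 1 else o.getD j 0 := by
  intro m
  induction m with
  | zero =>
    intro j
    rw [if_neg (by omega)]
    rfl
  | succ m ih =>
    intro j
    have hstep : paintSeg o a (m + 1) = (paintSeg o a m).set (a + m) 1 := by
      unfold paintSeg
      rw [List.range_succ, List.foldl_append, List.foldl_cons, List.foldl_nil]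
    rw [hstep, List.getD_eq_getElem?_getD, List.getElem?_set, paintSeg_length]
    by_cases he : a + m = j
    · rw [if_pos he]
      by_cases hl : a + m < o.length
      · rw [if_pos hl, if_pos (by omega)]
        rfl
      · rw [if_neg hl, if_neg (by omega),
            List.getD_eq_getElem?_getD, List.getElem?_eq_none (by omega)]
    · rw [if_neg he, ← List.getD_eq_getElem?_getD, ih]
      by_cases h1 : a ≤ j ∧ j < a + m ∧ j < o.length
      · rw [if_pos h1, if_pos (by omega)]
      · rw [if_neg h1, if_neg (by omega)]

def pFold (Y : List Int) (ps : List (ℕ × ℕ)) (o : List Int) : List Int :=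
  ps.foldl (fun o p => if bT Y p.1 then paintSeg o p.1 (p.2 - p.1) else o) o

theorem pFold_length (Y : List Int) : ∀ (ps : List (ℕ × ℕ)) (o : List Int),
    (pFold Y ps o).length = o.length := by
  intro ps
  induction ps with
  | nil => intro o; rfl
  | cons p ps ih =>
    intro o
    unfold pFold at *
    rw [List.foldl_cons, ih]
    by_cases h : bT Y p.1 = true
    · rw [if_pos h, paintSeg_length]
    · rw [if_neg h]

theorem pFold_getD (Y : List Int) : ∀ (ps : List (ℕ × ℕ)) (o : List Int) (j : ℕ),
    (pFold Y ps o).getD j 0 =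
      if (∃ p ∈ ps, bT Y p.1 = true ∧ p.1 ≤ j ∧ j < p.2) ∧ j < o.length then 1
      else o.getD j 0 := by
  intro ps
  induction ps with
  | nil =>
    intro o j
    rw [if_neg (by simp)]
    rfl
  | cons p ps ih =>
    intro o j
    have hrw : pFold Y (p :: ps) o
        = pFold Y ps (if bT Y p.1 then paintSeg o p.1 (p.2 - p.1) else o) := rfl
    rw [hrw, ih]
    by_cases hb : bT Y p.1 = true
    · rw [if_pos hb]
      rw [paintSeg_length, paintSeg_getD]
      by_cases hlen : j < o.length
      · by_cases hrest : ∃ q ∈ ps, bT Y q.1 = true ∧ q.1 ≤ j ∧ j < q.2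
        · rw [if_pos ⟨hrest, hlen⟩, if_pos ⟨⟨hrest.choose, List.mem_cons_of_mem p hrest.choose_spec.1,
            hrest.choose_spec.2⟩, hlen⟩]
        · rw [if_neg (fun h => hrest h.1)]
          by_cases hint : p.1 ≤ j ∧ j < p.2
          · rw [if_pos ⟨hint.1, by omega, hlen⟩,
                if_pos ⟨⟨p, List.mem_cons_self, hb, hint⟩, hlen⟩]
          · rw [if_neg (by omega), if_neg ?hno]
            case hno =>
              rintro ⟨⟨q, hq, hq2⟩, _⟩
              rcases List.mem_cons.mp hq with h | h
              · subst h; exact hint ⟨hq2.2.1, hq2.2.2⟩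
              · exact hrest ⟨q, h, hq2⟩
      · rw [if_neg (fun h => hlen h.2), if_neg (fun h => hlen h.2.2),
            if_neg (fun h => hlen h.2)]
    · rw [if_neg hb]
      by_cases hrest : (∃ q ∈ ps, bT Y q.1 = true ∧ q.1 ≤ j ∧ j < q.2) ∧ j < o.length
      · rw [if_pos hrest, if_pos ⟨⟨hrest.1.choose, List.mem_cons_of_mem p hrest.1.choose_spec.1,
          hrest.1.choose_spec.2⟩, hrest.2⟩]
      · rw [if_neg hrest]
        by_cases hall : (∃ q ∈ p :: ps, bT Y q.1 = true ∧ q.1 ≤ j ∧ j < q.2) ∧ j < o.length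
        · exfalso
          obtain ⟨⟨q, hq, hq2⟩, hlen⟩ := hall
          rcases List.mem_cons.mp hq with h | h
          · subst h; exact hb hq2.1
          · exact hrest ⟨⟨q, h, hq2⟩, hlen⟩
        · rw [if_neg hall]
theorem pairsC (Y : List Int) : ∀ (E : List ℕ) (n j : ℕ), E.Pairwise (· < ·) → j < n →
    ((∃ p ∈ E.zip (E.drop 1 ++ [n]), bT Y p.1 = true ∧ p.1 ≤ j ∧ j < p.2) ↔
     (∃ e ∈ E, bT Y e = true ∧ e ≤ j ∧ ∀ i ∈ E, e < i → j < i)) := by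
  intro E
  induction E with
  | nil => intro n j _ _; simp
  | cons e E' ih =>
    intro n j hpw hj
    have hsort := List.pairwise_cons.mp hpw
    cases E' with
    | nil =>
      have hz : ([e].zip (List.drop 1 [e] ++ [n])) = [(e, n)] := rfl
      rw [hz, List.exists_mem_cons_iff, List.exists_mem_cons_iff]
      constructor
      · rintro (⟨h1, h2, h3⟩ | ⟨p, hp, _⟩)
        · refine Or.inl ⟨h1, h2, ?_⟩
          intro i hi hlt
          rcases List.mem_cons.mp hi with h | h
          · omega
          · cases h
        · cases hp
      · rintro (⟨h1, h2, _⟩ | ⟨p, hp, _⟩)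
        · exact Or.inl ⟨h1, h2, hj⟩
        · cases hp
    | cons e' E'' =>
      have hzip : ((e :: e' :: E'').zip (List.drop 1 (e :: e' :: E'') ++ [n]))
          = (e, e') :: ((e' :: E'').zip (List.drop 1 (e' :: E'') ++ [n])) := by
        simp [List.zip_cons_cons]
      have hee' : e < e' := hsort.1 e' List.mem_cons_self
      have hlt_all : ∀ i ∈ e' :: E'', e < i := hsort.1
      have hmin : ∀ i ∈ e' :: E'', e' ≤ i := by
        intro i hi
        rcases List.mem_cons.mp hi with h | h
        · omega
        · exact le_of_lt ((List.pairwise_cons.mp hsort.2).1 i h)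
      rw [hzip]
      constructor
      · rintro ⟨p, hp, h1, h2, h3⟩
        rcases List.mem_cons.mp hp with h | h
        · subst h
          
          refine ⟨e, List.mem_cons_self, h1, h2, ?_⟩
          intro i hi hlt
          rcases List.mem_cons.mp hi with h | h
          · omega
          · have := hmin i h; omega
        · obtain ⟨e₀, he₀, g1, g2, g3⟩ := (ih n j hsort.2 hj).mp ⟨p, h, h1, h2, h3⟩
          refine ⟨e₀, List.mem_cons_of_mem _ he₀, g1, g2, ?_⟩
          intro i hi hlt
          rcases List.mem_cons.mp hi with h' | h'
          · subst h'; have := hlt_all e₀ he₀; omega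
          · exact g3 i h' hlt
      · rintro ⟨e₀, he₀, h1, h2, h3⟩
        rcases List.mem_cons.mp he₀ with h | h
        · subst h
          exact ⟨(e₀, e'), List.mem_cons_self, h1, h2,
            h3 e' (List.mem_cons_of_mem _ List.mem_cons_self) hee'⟩
        · obtain ⟨p, hp, hs⟩ := (ih n j hsort.2 hj).mpr
            ⟨e₀, h, h1, h2, fun i hi hlt => h3 i (List.mem_cons_of_mem _ hi) hlt⟩
          exact ⟨p, List.mem_cons_of_mem _ hp, hs⟩
def EList (Y : List Int) : List ℕ := (List.range Y.length).filter (evB Y)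

theorem eventsEq (Y : List Int) :
    (PySem.List.pyRange 2 (Y.length : Int) 1).filter
      (fun i => decide ((PySem.List.pyGetD Y i 0 ≤ 8 ∧ 8 ≤ PySem.List.pyGetD Y (i - 1) 0) ∨
        (PySem.List.pyGetD Y i 0 > PySem.List.pyGetD Y (i - 1) 0 ∧
         PySem.List.pyGetD Y (i - 1) 0 > 8)))
    = (EList Y).map (fun (e : ℕ) => (e : Int)) := by
  rcases Nat.lt_or_ge Y.length 2 with h | h
  · rw [PySem.List.pyRange_one_eq_nil (by exact_mod_cast Nat.le_of_lt h)]
    have : EList Y = [] := by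
      unfold EList
      rw [List.filter_eq_nil_iff]
      intro a ha
      have ha' : a < Y.length := List.mem_range.mp ha
      simp only [evB, Bool.and_eq_true, decide_eq_true_eq]
      exact fun h => absurd h.1 (by omega)
    rw [this, List.map_nil, List.filter_nil]
  · have htn : ((Y.length : Int) - 2).toNat = Y.length - 2 := by omega
    rw [PySem.List.pyRange_one, htn, List.filter_map]
    unfold EList
    rw [show Y.length = 2 + (Y.length - 2) by omega, List.range_add, List.filter_append]
    have h01 : (List.range 2).filter (evB Y) = [] := by
      rw [show List.range 2 = [0, 1] from rfl]
      simp [evB]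
    rw [h01, List.nil_append, List.filter_map,
        show 2 + (Y.length - 2) - 2 = Y.length - 2 from by omega]
    have hpred : ((fun i => decide ((PySem.List.pyGetD Y i 0 ≤ 8 ∧ 8 ≤ PySem.List.pyGetD Y (i - 1) 0) ∨
        (PySem.List.pyGetD Y i 0 > PySem.List.pyGetD Y (i - 1) 0 ∧
         PySem.List.pyGetD Y (i - 1) 0 > 8))) ∘ (fun k : ℕ => (2 : Int) + k))
        = (evB Y ∘ fun x => 2 + x) := by
      funext k
      simp only [Function.comp]
      have hc1 : (2 : Int) + (k : Int) = ((2 + k : ℕ) : Int) := by push_cast; ring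
      have hc2 : ((2 + k : ℕ) : Int) - 1 = ((1 + k : ℕ) : Int) := by push_cast; ring
      simp only [hc1, hc2, PySem.List.pyGetD_natCast]
      simp only [evB, sellB, buyB, gd, show 2 + k - 1 = 1 + k by omega,
        ← Bool.decide_and, ← Bool.decide_or]
      rw [decide_eq_decide]
      constructor
      · rintro (h | h)
        · exact ⟨by omega, Or.inl h⟩
        · exact ⟨by omega, Or.inr ⟨h.1, h.2⟩⟩
      · rintro ⟨_, h | h⟩
        · exact Or.inl h
        · exact Or.inr ⟨h.1, h.2⟩
    rw [hpred]
    have hcomp : ((fun (e : ℕ) => (e : Int)) ∘ fun x => 2 + x) = fun k : ℕ => 2 + (k : Int) := by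
      funext k
      simp only [Function.comp]
      push_cast
      ring
    rw [List.map_map, hcomp]

theorem QE (Y : List Int) (j : ℕ) (hj : j < Y.length) :
    (∃ e ∈ EList Y, bT Y e = true ∧ e ≤ j ∧ ∀ i ∈ EList Y, e < i → j < i) ↔ Q Y j := by
  have hmem : ∀ e, e ∈ EList Y ↔ (e < Y.length ∧ evB Y e = true) := by
    intro e
    unfold EList
    rw [List.mem_filter, List.mem_range]
  constructor
  · rintro ⟨e, he, h1, h2, h3⟩
    obtain ⟨hlt, hev⟩ := (hmem e).mp he
    refine ⟨e, hev, h1, h2, ?_⟩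
    intro i hi hilt
    rcases Nat.lt_or_ge i Y.length with h | h
    · exact h3 i ((hmem i).mpr ⟨h, hi⟩) hilt
    · omega
  · rintro ⟨e, hev, h1, h2, h3⟩
    refine ⟨e, (hmem e).mpr ⟨by omega, hev⟩, h1, h2, ?_⟩
    intro i hi hilt
    exact h3 i ((hmem i).mp hi).2 hilt

theorem pyRangePaint (a b : ℕ) (o : List Int) :
    (PySem.List.pyRange (a : Int) (b : Int) 1).foldl (fun o k => o.set k.toNat 1) o
      = paintSeg o a (b - a) := by
  rw [PySem.List.pyRange_one, List.foldl_map, show ((b : Int) - (a : Int)).toNat = b - a by omega]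
  unfold paintSeg
  have hf : (fun (o : List Int) (k : ℕ) => o.set ((a : Int) + (k : Int)).toNat 1)
      = (fun (o : List Int) (k : ℕ) => o.set (a + k) 1) := by
    funext o k
    have hk : ((a : Int) + (k : Int)).toNat = a + k := by omega
    rw [hk]
  rw [hf]

theorem b_eq_spec (Y : List Int) : get_holdings_alt Y = specList Y := by
  unfold get_holdings_alt
  dsimp only
  rw [eventsEq]
  rw [show ([((Y.length : ℕ) : Int)] : List Int) = List.map (fun (e : ℕ) => (e : Int)) [Y.length] from rfl,
      ← List.map_drop, ← List.map_append, List.zip_map, List.foldl_map]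
  have hfun : (fun (o : List Int) (p : ℕ × ℕ) =>
      if 8 < PySem.List.pyGetD Y ((Prod.map (fun (e : ℕ) => (e : Int)) (fun (e : ℕ) => (e : Int)) p).1) 0 then
        (PySem.List.pyRange ((Prod.map (fun (e : ℕ) => (e : Int)) (fun (e : ℕ) => (e : Int)) p).1)
          ((Prod.map (fun (e : ℕ) => (e : Int)) (fun (e : ℕ) => (e : Int)) p).2) 1).foldl
          (fun o k => o.set k.toNat 1) o
      else o)
      = (fun (o : List Int) (p : ℕ × ℕ) => if bT Y p.1 then paintSeg o p.1 (p.2 - p.1) else o) := by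
    funext o p
    have h1 : (Prod.map (fun (e : ℕ) => (e : Int)) (fun (e : ℕ) => (e : Int)) p).1 = ((p.1 : ℕ) : Int) := rfl
    have h2 : (Prod.map (fun (e : ℕ) => (e : Int)) (fun (e : ℕ) => (e : Int)) p).2 = ((p.2 : ℕ) : Int) := rfl
    rw [h1, h2, pyRangePaint]
    simp only [PySem.List.pyGetD_natCast]
    have hiff : (8 < Y.getD p.1 0) ↔ (bT Y p.1 = true) := by
      simp [bT, gd]
    rw [if_congr hiff rfl rfl]
  rw [hfun]
  have hpf : ((EList Y).zip ((EList Y).drop 1 ++ [Y.length])).foldl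
      (fun (o : List Int) (p : ℕ × ℕ) => if bT Y p.1 then paintSeg o p.1 (p.2 - p.1) else o)
      (List.replicate (max Y.length 2) 0)
      = pFold Y ((EList Y).zip ((EList Y).drop 1 ++ [Y.length])) (List.replicate (max Y.length 2) 0) := rfl
  rw [hpf]
  apply List.ext_getElem
  · rw [pFold_length, List.length_replicate]
    unfold specList
    rw [List.length_map, List.length_range]
  · intro j hja hjb
    have hjlen : j < max Y.length 2 := by
      rw [pFold_length, List.length_replicate] at hja
      exact hja
    have hspec : (specList Y)[j]'hjb = sVal Y j := by
      unfold specList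
      simp
    rw [hspec]
    have hgd : (pFold Y ((EList Y).zip ((EList Y).drop 1 ++ [Y.length]))
        (List.replicate (max Y.length 2) 0)).getD j 0
        = (pFold Y ((EList Y).zip ((EList Y).drop 1 ++ [Y.length]))
        (List.replicate (max Y.length 2) 0))[j]'hja := by
      rw [List.getD_eq_getElem?_getD, List.getElem?_eq_getElem hja]
      rfl
    rw [← hgd, pFold_getD, List.length_replicate]
    have hrepl : (List.replicate (max Y.length 2) (0 : Int)).getD j 0 = 0 := by
      rw [List.getD_eq_getElem?_getD]
      rcases Nat.lt_or_ge j (max Y.length 2) with h | h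
      · rw [List.getElem?_eq_getElem (by rw [List.length_replicate]; exact h)]
        simp
      · rw [List.getElem?_eq_none (by rw [List.length_replicate]; exact h)]
        rfl
    rcases Nat.lt_or_ge Y.length 2 with hn | hn
    · -- short list: no events at all
      have hE : EList Y = [] := by
        unfold EList
        rw [List.filter_eq_nil_iff]
        intro a ha
        have ha' : a < Y.length := List.mem_range.mp ha
        simp only [evB, Bool.and_eq_true, decide_eq_true_eq]
        exact fun h => absurd h.1 (by omega)
      rw [hE]
      simp only [List.zip_nil_left]
      rw [if_neg (by simp)]
      rw [hrepl]
      have hj2 : j < 2 := by omega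
      interval_cases j <;> simp [sVal]
    · have hjY : j < Y.length := by omega
      have hC : (∃ p ∈ (EList Y).zip ((EList Y).drop 1 ++ [Y.length]),
          bT Y p.1 = true ∧ p.1 ≤ j ∧ j < p.2) ↔ (sVal Y j = 1) := by
        rw [pairsC Y (EList Y) Y.length j
          (List.pairwise_lt_range.filter _) hjY]
        rw [QE Y j hjY]
        exact (sVal_eq_one_iff Y j).symm
      rcases sVal01 Y j with h0 | h1
      · rw [if_neg (fun hh => by rw [h0] at hC; exact absurd (hC.mp hh.1) (by norm_num)), hrepl, h0]
      · rw [if_pos ⟨hC.mpr h1, hjlen⟩, h1]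

-- ===== VERDICT (by name: the statement is the Claim_ definition above) =====
theorem get_holdings_spec : Claim_equal_get_holdings := by
  intro Y _
  unfold Spec_get_holdings
  rw [a_eq_spec, b_eq_spec]
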